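-- pv_equiv track=rewrite | github.com/jclements3/HarpHymnal | trefoil/reharm/catalog.py | _dominant_tactic_per_dim
-- ===== SOURCE A (Python) =====
-- from collections import Counter, defaultdict
--
-- def _dominant_tactic_per_dim(per_bar_manifests: list[dict[str, str]]) -> dict[str, str]:
--     """Given a list of compact per-bar manifests
--     ({"substitution": "as_written", ...}), return one tactic per dimension
--     by majority vote.  Ties broken by first-seen (stable for display)."""
--     by_dim: dict[str, Counter] = defaultdict(Counter)
--     first_seen: dict[str, str] = {}
--     for bar in per_bar_manifests:
--         for dim, tid in (bar or {}).items():
--             by_dim[dim][tid] += 1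
--             first_seen.setdefault(f"{dim}|{tid}", tid)
--     out: dict[str, str] = {}
--     for dim, counter in by_dim.items():
--         top_count = max(counter.values())
--         # Among ties, prefer the first-seen bar's tactic
--         tied = [t for t, c in counter.items() if c == top_count]
--         if len(tied) == 1:
--             out[dim] = tied[0]
--         else:
--             for bar in per_bar_manifests:
--                 if bar.get(dim) in tied:
--                     out[dim] = bar[dim]
--                     break
--             else:
--                 out[dim] = tied[0]
--     return out
-- ===== SOURCE B (Python) =====
-- from collections import Counter, defaultdict
--
-- def _dominant_tactic_per_dim(per_bar_manifests):
--     by_dim = defaultdict(Counter)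
--     for bar in per_bar_manifests:
--         for dim, tid in (bar or {}).items():
--             by_dim[dim][tid] += 1
--     # Counter iterates in first-seen order and max returns the first maximal
--     # element, so ties resolve to the first-seen tactic, as in the original.
--     return {dim: max(counter, key=counter.get) for dim, counter in by_dim.items()}
-- ===== Notes on version B (the rewrite author's own statement) =====
-- stated objective: simpler
-- what changed: B keeps the single counting pass but replaces A's tie-break machinery (the dead first_seen dict, the tied-list build, the length test and the rescan over all bars) by taking each counter's first maximal key directly with max(counter, key=counter.get), which resolves ties to the first-seen tactic via Counter insertion order.
import Mathlib
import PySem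

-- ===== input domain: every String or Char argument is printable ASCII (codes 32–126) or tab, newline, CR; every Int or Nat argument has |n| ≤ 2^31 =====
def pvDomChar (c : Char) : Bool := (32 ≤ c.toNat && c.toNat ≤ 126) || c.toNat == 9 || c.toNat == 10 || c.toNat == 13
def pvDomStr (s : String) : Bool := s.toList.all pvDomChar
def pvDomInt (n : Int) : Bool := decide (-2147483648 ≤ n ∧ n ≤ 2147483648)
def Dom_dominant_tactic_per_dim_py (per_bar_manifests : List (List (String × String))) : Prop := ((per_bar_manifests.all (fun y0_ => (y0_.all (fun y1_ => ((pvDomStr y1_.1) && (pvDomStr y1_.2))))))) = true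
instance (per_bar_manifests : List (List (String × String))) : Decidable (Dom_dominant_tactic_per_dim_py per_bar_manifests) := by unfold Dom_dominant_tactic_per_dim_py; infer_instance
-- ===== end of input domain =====

-- B replaces A's tie-break rescan over all bars by taking the per-dimension counter's
-- first maximal key directly (simpler decomposition; the dead `first_seen` dict is dropped).

-- ===== PORT A =====
-- Shared build loop (both Pythons build `by_dim` with the identical nested loop):
-- for bar in per_bar_manifests: for dim, tid in (bar or {}).items(): by_dim[dim][tid] += 1
-- (`bar or {}` is the identity on a dict argument; A's `first_seen` dict is written but
--  never read, so it does not appear in the port.)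
def pvBuildByDim (bars : List (List (String × String))) : PySem.Dict String (PySem.Dict String Int) :=
  bars.foldl (fun bd bar =>
    ((PySem.Dict.ofList bar).items).foldl
      (fun bd p => bd.insert p.1 ((bd.getD p.1 PySem.Dict.empty).modify p.2 0 (· + 1))) bd)
    PySem.Dict.empty

-- `bar.get(dim) in tied` (None, i.e. a missing key, is never in tied)
def pvPredA (tied : List String) (dim : String) (bar : List (String × String)) : Bool :=
  match (PySem.Dict.ofList bar).get? dim with
  | some v => tied.contains v
  | none => false

def dominant_tactic_per_dim_py (per_bar_manifests : List (List (String × String))) : List (String × String) :=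
  let byDim := pvBuildByDim per_bar_manifests
  (byDim.items.foldl (fun out p =>
      -- max(counter.values()); the counter is never empty when this runs, getD 0 is a totality guard
      let topCount : Int := (PySem.List.max? p.2.values (fun c => c)).getD 0
      let tied := (p.2.items.filter (fun q => q.2 == topCount)).map (fun q => q.1)
      if tied.length == 1 then
        out.insert p.1 (tied.headD "")  -- tied[0]; tied is nonempty, headD "" is a totality guard
      else
        match per_bar_manifests.find? (pvPredA tied p.1) with
        | some bar => out.insert p.1 (((PySem.Dict.ofList bar).get? p.1).getD "")  -- bar[dim]; present, getD "" is a totality guard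
        | none => out.insert p.1 (tied.headD "")) PySem.Dict.empty).items

-- ===== PORT B =====
def dominant_tactic_per_dim_py_alt (per_bar_manifests : List (List (String × String))) : List (String × String) :=
  let byDim := pvBuildByDim per_bar_manifests
  -- {dim: max(counter, key=counter.get) for dim, counter in by_dim.items()}
  -- max with a key returns the FIRST maximal element = PySem.List.max?; counter.get t = counter.getD t 0 on keys;
  -- the comprehension's keys are byDim's distinct keys, so its items list is this map; getD "" is a totality guard
  byDim.items.map (fun p => (p.1, (PySem.List.max? p.2.keys (fun t => p.2.getD t 0)).getD ""))

-- ===== PRECONDITION & SPEC =====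
def Spec_dominant_tactic_per_dim_py (per_bar_manifests : List (List (String × String))) (out : List (String × String)) : Prop := out = dominant_tactic_per_dim_py_alt per_bar_manifests
instance (per_bar_manifests : List (List (String × String))) (out : List (String × String)) : Decidable (Spec_dominant_tactic_per_dim_py per_bar_manifests out) := by unfold Spec_dominant_tactic_per_dim_py; infer_instance

-- ===== CLAIM (what is proved, stated in full; the proofs are below) =====
def Claim_equal_dominant_tactic_per_dim_py : Prop := ∀ (per_bar_manifests : List (List (String × String))), Dom_dominant_tactic_per_dim_py per_bar_manifests → Spec_dominant_tactic_per_dim_py per_bar_manifests (dominant_tactic_per_dim_py per_bar_manifests)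

-- ===== LEMMAS AND PROOFS =====

-- the flat stream of (dim, tid) pairs the build loop processes
def pvStream (bars : List (List (String × String))) : List (String × String) :=
  bars.flatMap (fun bar => (PySem.Dict.ofList bar).items)

-- the sub-stream of tactic ids for a single dimension
def pvProj (ps : List (String × String)) (dim : String) : List String :=
  ps.filterMap (fun p => if p.1 = dim then some p.2 else none)

-- the value port A stores for one (dim, counter) item of byDim
def pvValueA (bars : List (List (String × String))) (p : String × PySem.Dict String Int) : String :=
  let topCount : Int := (PySem.List.max? p.2.values (fun c => c)).getD 0
  let tied := (p.2.items.filter (fun q => q.2 == topCount)).map (fun q => q.1)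
  if tied.length == 1 then tied.headD ""
  else
    match bars.find? (pvPredA tied p.1) with
    | some bar => ((PySem.Dict.ofList bar).get? p.1).getD ""
    | none => tied.headD ""

-- the build loop is a single-level fold over the flat pair stream
lemma pvBuildByDim_eq_stream (bars : List (List (String × String))) :
    pvBuildByDim bars =
      (pvStream bars).foldl
        (fun bd p => bd.insert p.1 ((bd.getD p.1 PySem.Dict.empty).modify p.2 0 (· + 1)))
        PySem.Dict.empty := by
  simp [pvBuildByDim, pvStream, List.foldl_flatMap]

lemma pvBuildByDim_keys_nodup (bars : List (List (String × String))) :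
    (pvBuildByDim bars).keys.Nodup := by
  rw [pvBuildByDim_eq_stream]
  exact PySem.Dict.nodup_keys_foldl_insert_key (pvStream bars) (fun p => p.1)
    (fun bd p => (bd.getD p.1 PySem.Dict.empty).modify p.2 0 (· + 1)) PySem.Dict.empty
    PySem.Dict.nodup_keys_empty

lemma pvGetD_aux (xs : List (String × String)) (bd : PySem.Dict String (PySem.Dict String Int)) (dim : String) :
    (xs.foldl (fun bd p => bd.insert p.1 ((bd.getD p.1 PySem.Dict.empty).modify p.2 0 (· + 1))) bd).getD dim PySem.Dict.empty
      = (pvProj xs dim).foldl (fun c t => c.modify t 0 (· + 1)) (bd.getD dim PySem.Dict.empty) := by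
  induction xs generalizing bd with
  | nil => simp [pvProj]
  | cons x t ih =>
    simp only [List.foldl_cons]
    rw [ih]
    by_cases hx : x.1 = dim
    · subst hx
      rw [PySem.Dict.getD_insert_self]
      simp [pvProj]
    · rw [PySem.Dict.getD_insert_of_ne _ _ _ (fun h => hx h.symm)]
      simp [pvProj, hx]

-- per-dimension content of the built dict: the counter of that dimension's stream
lemma pvBuildByDim_getD (bars : List (List (String × String))) (dim : String) :
    (pvBuildByDim bars).getD dim PySem.Dict.empty =
      PySem.Dict.counter (pvProj (pvStream bars) dim) := by
  rw [pvBuildByDim_eq_stream, pvGetD_aux]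
  simp [PySem.Dict.counter, PySem.Dict.getD_empty]

lemma pvProj_ne_nil_of_mem_keys (bars : List (List (String × String))) (dim : String)
    (h : dim ∈ (pvBuildByDim bars).keys) : pvProj (pvStream bars) dim ≠ [] := by
  rw [pvBuildByDim_eq_stream, PySem.Dict.keys_foldl_insert_key] at h
  have h2 : dim ∈ (pvStream bars).map (fun p => p.1) := by
    rcases (PySem.Set.mem_update _ _ _).1 h with h' | h'
    · simp [PySem.Dict.keys_empty] at h'
    · exact h'
  obtain ⟨p, hp, hdim⟩ := List.mem_map.1 h2
  have hmem : p.2 ∈ pvProj (pvStream bars) dim :=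
    List.mem_filterMap.2 ⟨p, hp, by simp [hdim]⟩
  exact List.ne_nil_of_mem hmem

-- projecting one bar's dict items to a dimension yields its lookup result
lemma pvProj_items (l : List (String × String)) (h : (l.map Prod.fst).Nodup) (dim : String) :
    pvProj l dim = ((PySem.Dict.mk l).get? dim).toList := by
  induction l with
  | nil => simp [pvProj, PySem.Dict.get?]
  | cons x t ih =>
    simp only [List.map_cons, List.nodup_cons] at h
    by_cases hx : x.1 = dim
    · have ht : pvProj t dim = [] := by
        apply List.filterMap_eq_nil_iff.2
        intro p hp
        have : p.1 ≠ dim := fun hd => h.1 (hx ▸ hd ▸ List.mem_map_of_mem hp)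
        simp [this]
      simp only [pvProj] at ht ⊢
      simp [hx, ht, PySem.Dict.get?]
    · have := ih h.2
      simp only [pvProj] at this ⊢
      simp only [List.filterMap_cons, if_neg hx]
      rw [this]
      simp [PySem.Dict.get?, show (x.1 == dim) = false from beq_eq_false_iff_ne.2 hx]

lemma pvProj_stream (bars : List (List (String × String))) (dim : String) :
    pvProj (pvStream bars) dim =
      bars.flatMap (fun bar => ((PySem.Dict.ofList bar).get? dim).toList) := by
  have hbar : ∀ bar : List (String × String),
      List.filterMap (fun p => if p.1 = dim then some p.2 else none) (PySem.Dict.ofList bar).items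
        = ((PySem.Dict.ofList bar).get? dim).toList := by
    intro bar
    have hnd : ((PySem.Dict.ofList bar).items.map Prod.fst).Nodup := by
      simpa [PySem.Dict.keys] using PySem.Dict.nodup_keys_ofList bar
    simpa [pvProj] using pvProj_items (PySem.Dict.ofList bar).items hnd dim
  simp only [pvProj, pvStream, List.filterMap_flatMap, hbar]

-- find? over bars, looking inside each bar's optional value, is find? over the flat value stream
lemma pvFind_flat {α β : Type} (f : α → Option β) (q : β → Bool) (l : List α) :
    (l.flatMap (fun a => (f a).toList)).find? q =
      (l.find? (fun a => ((f a).map q).getD false)).bind f := by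
  induction l with
  | nil => simp
  | cons a t ih =>
    cases hf : f a with
    | none => simpa [List.flatMap_cons, hf] using ih
    | some v =>
      by_cases hq : q v = true
      · simp [List.flatMap_cons, hf, hq]
      · simp only [List.flatMap_cons, hf, Option.toList_some, List.singleton_append,
          List.find?_cons, hq, Option.map_some, Option.getD_some]
        simpa [Bool.not_eq_true] using ih

-- max of a mapped list
lemma pvMax?_map_aux (l : List String) (f : String → Int) :
    ∀ (m : String), PySem.List.max? (f m :: l.map f) (fun c => c)
      = (PySem.List.max? (m :: l) f).map f := by
  induction l with
  | nil => intro m; simp [PySem.List.max?]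
  | cons x t ih =>
    intro m
    by_cases h : f m < f x
    · have := ih x; simp [PySem.List.max?, h] at this ⊢; exact this
    · have := ih m; simp [PySem.List.max?, h] at this ⊢; exact this

lemma pvMax?_map (l : List String) (f : String → Int) :
    PySem.List.max? (l.map f) (fun c => c) = (PySem.List.max? l f).map f := by
  cases l with
  | nil => simp [PySem.List.max?]
  | cons m t => exact pvMax?_map_aux t f m

lemma pvMax?_le_head (cnt : String → Int) (l : List String) :
    ∀ (m w : String), PySem.List.max? (m :: l) cnt = some w → cnt m ≤ cnt w := by
  induction l with
  | nil => intro m w h; simp [PySem.List.max?] at h; subst h; rfl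
  | cons x t ih =>
    intro m w h
    by_cases hx : cnt m < cnt x
    · have h' : PySem.List.max? (x :: t) cnt = some w := by
        simpa [PySem.List.max?, hx] using h
      exact le_of_lt (lt_of_lt_of_le hx (ih x w h'))
    · have h' : PySem.List.max? (m :: t) cnt = some w := by
        simpa [PySem.List.max?, hx] using h
      exact ih m w h'

-- max? returns the FIRST element attaining the maximum key
lemma pvMax?_first_aux (cnt : String → Int) (l : List String) :
    ∀ (m w : String), PySem.List.max? (m :: l) cnt = some w →
    ((m :: l).filter (fun t => cnt t == cnt w)).head? = some w := by
  induction l with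
  | nil =>
    intro m w h; simp [PySem.List.max?] at h; subst h; simp
  | cons x t ih =>
    intro m w h
    by_cases hx : cnt m < cnt x
    · have h' : PySem.List.max? (x :: t) cnt = some w := by
        simpa [PySem.List.max?, hx] using h
      have hle := pvMax?_le_head cnt t x w h'
      have hm : (cnt m == cnt w) = false := beq_eq_false_iff_ne.2 (by intro he; omega)
      simpa [List.filter_cons, hm] using ih x w h'
    · have h' : PySem.List.max? (m :: t) cnt = some w := by
        simpa [PySem.List.max?, hx] using h
      have hle := pvMax?_le_head cnt t m w h'
      have hrec := ih m w h'
      by_cases hm : cnt m = cnt w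
      · have hPm : (cnt m == cnt w) = true := beq_iff_eq.2 hm
        simp only [List.filter_cons, hPm] at hrec ⊢
        simpa using hrec
      · have hPm : (cnt m == cnt w) = false := beq_eq_false_iff_ne.2 hm
        have hxw : (cnt x == cnt w) = false := beq_eq_false_iff_ne.2 (by intro he; omega)
        simp only [List.filter_cons, hPm] at hrec
        simp only [List.filter_cons, hPm, hxw]
        simpa using hrec

lemma pvMax?_first_tie (l : List String) (cnt : String → Int) (w : String)
    (h : PySem.List.max? l cnt = some w) :
    (l.filter (fun t => cnt t == cnt w)).head? = some w := by
  cases l with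
  | nil => simp [PySem.List.max?] at h
  | cons x t => exact pvMax?_first_aux cnt t x w h

-- dedup keeps first occurrences, so a first hit among deduped elements is the first hit in the list
lemma pvHead_filter_ofList (s : List String) (q : String → Bool) :
    ((PySem.Set.ofList s).filter q).head? = (s.filter q).head? := by
  induction s with
  | nil => simp
  | cons x t ih =>
    rw [PySem.Set.ofList_cons]
    by_cases hq : q x = true
    · simp [List.filter_cons, hq]
    · have hqx : q x = false := by simpa using hq
      have hcongr : List.filter (fun a => q a && !(a == x)) (PySem.Set.ofList t)
          = List.filter q (PySem.Set.ofList t) := by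
        apply List.filter_congr; intro y _
        by_cases hy : y = x
        · subst hy; simp [hqx]
        · simp [beq_eq_false_iff_ne.2 hy]
      simp only [List.filter_cons, hqx, Bool.false_eq_true, PySem.Set.discard,
        List.filter_filter]
      simp [hcongr, ih]

-- the per-dimension core: A's selected value equals B's first-maximal key
lemma pvValueA_eq (bars : List (List (String × String))) (p : String × PySem.Dict String Int)
    (hp : p ∈ (pvBuildByDim bars).items) :
    pvValueA bars p = (PySem.List.max? p.2.keys (fun t => p.2.getD t 0)).getD "" := by
  have hnd := pvBuildByDim_keys_nodup bars
  have hkey : p.1 ∈ (pvBuildByDim bars).keys := PySem.Dict.mem_keys_of_mem_items _ hp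
  have hc : p.2 = PySem.Dict.counter (pvProj (pvStream bars) p.1) := by
    have hpp : (p.1, p.2) ∈ (pvBuildByDim bars).items := hp
    have := PySem.Dict.getD_of_mem_items (pvBuildByDim bars) hpp hnd PySem.Dict.empty
    rw [← this, pvBuildByDim_getD]
  have hne : pvProj (pvStream bars) p.1 ≠ [] := pvProj_ne_nil_of_mem_keys bars p.1 hkey
  set sdim := pvProj (pvStream bars) p.1 with hsdim
  set cnt : String → Int := fun t => (sdim.count t : Int) with hcntdef
  set ds := PySem.Set.ofList sdim with hdsdef
  have hkeys : p.2.keys = ds := by rw [hc]; exact PySem.Dict.keys_counter sdim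
  have hgetD : (fun t => p.2.getD t 0) = cnt := by
    funext t; rw [hc]; exact PySem.Dict.getD_counter sdim t
  have hitems : p.2.items = ds.map (fun k => (k, cnt k)) := by
    rw [hc]; exact PySem.Dict.items_counter sdim
  have hvalues : p.2.values = ds.map cnt := by
    simp [PySem.Dict.values, hitems, List.map_map, Function.comp]
  have hdsne : ds ≠ [] := by
    obtain ⟨y, hy⟩ := List.exists_mem_of_ne_nil sdim hne
    exact List.ne_nil_of_mem ((PySem.Set.mem_ofList sdim y).2 hy)
  obtain ⟨w, hw⟩ : ∃ w, PySem.List.max? ds cnt = some w := by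
    cases hmw : PySem.List.max? ds cnt with
    | none => exact absurd ((PySem.List.max?_eq_none_iff _ _).1 hmw) hdsne
    | some w => exact ⟨w, rfl⟩
  have htop : (PySem.List.max? p.2.values (fun c => c)).getD 0 = cnt w := by
    rw [hvalues, pvMax?_map, hw]; rfl
  have htied : (p.2.items.filter (fun q => q.2 == (PySem.List.max? p.2.values (fun c => c)).getD 0)).map (fun q => q.1)
      = ds.filter (fun t => cnt t == cnt w) := by
    rw [htop, hitems, List.filter_map]
    simp [Function.comp_def]
  have hhead : (ds.filter (fun t => cnt t == cnt w)).head? = some w :=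
    pvMax?_first_tie ds cnt w hw
  have hheadD : (ds.filter (fun t => cnt t == cnt w)).headD "" = w := by
    rw [List.headD_eq_head?_getD, hhead]; rfl
  have hcontains : ds.filter (fun v => (ds.filter (fun t => cnt t == cnt w)).contains v)
      = ds.filter (fun t => cnt t == cnt w) := by
    apply List.filter_congr
    intro v hv
    by_cases hvw : cnt v = cnt w
    · simp [List.elem_eq_contains.symm, List.elem_iff, List.mem_filter, hv, hvw]
    · simp [List.elem_eq_contains.symm, List.elem_iff, List.mem_filter, hvw]
  have hpfun : (fun a => (((PySem.Dict.ofList a).get? p.1).map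
        (fun v => (ds.filter (fun t => cnt t == cnt w)).contains v)).getD false)
      = pvPredA (ds.filter (fun t => cnt t == cnt w)) p.1 := by
    funext a
    unfold pvPredA
    cases h : (PySem.Dict.ofList a).get? p.1 <;> simp [h]
  have hfind : (bars.find? (pvPredA (ds.filter (fun t => cnt t == cnt w)) p.1)).bind
      (fun bar => (PySem.Dict.ofList bar).get? p.1) = some w := by
    rw [← hpfun]
    have base := pvFind_flat (fun bar => (PySem.Dict.ofList bar).get? p.1)
      (fun v => (ds.filter (fun t => cnt t == cnt w)).contains v) bars
    have lhs : ((bars.flatMap (fun a => ((PySem.Dict.ofList a).get? p.1).toList)).find?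
        (fun v => (ds.filter (fun t => cnt t == cnt w)).contains v)) = some w := by
      rw [← pvProj_stream bars p.1, ← hsdim]
      rw [← List.head?_filter, ← pvHead_filter_ofList, ← hdsdef, hcontains, hhead]
    exact base.symm.trans lhs
  simp only [pvValueA, htied]
  by_cases hlen : ((ds.filter (fun t => cnt t == cnt w)).length == 1) = true
  · rw [hgetD, hkeys, hw]
    simp only [hlen, if_true, Option.getD_some]
    rw [List.headD_eq_head?_getD, hhead]; rfl
  · rw [hgetD, hkeys, hw]
    simp only [hlen, Bool.false_eq_true, if_false, Option.getD_some]
    cases hf : bars.find? (pvPredA (ds.filter (fun t => cnt t == cnt w)) p.1) with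
    | none =>
      simp only [hf]
      rw [List.headD_eq_head?_getD, hhead]; rfl
    | some bar =>
      rw [hf] at hfind
      simp only [Option.bind_some] at hfind
      simp [hfind]

-- ===== VERDICT (by name: the statement is the Claim_ definition above) =====
theorem dominant_tactic_per_dim_py_spec : Claim_equal_dominant_tactic_per_dim_py := by
  intro bars _
  unfold Spec_dominant_tactic_per_dim_py dominant_tactic_per_dim_py dominant_tactic_per_dim_py_alt
  have hfun : (fun (out : PySem.Dict String String) (p : String × PySem.Dict String Int) =>
      let topCount : Int := (PySem.List.max? p.2.values (fun c => c)).getD 0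
      let tied := (p.2.items.filter (fun q => q.2 == topCount)).map (fun q => q.1)
      if tied.length == 1 then
        out.insert p.1 (tied.headD "")
      else
        match bars.find? (pvPredA tied p.1) with
        | some bar => out.insert p.1 (((PySem.Dict.ofList bar).get? p.1).getD "")
        | none => out.insert p.1 (tied.headD ""))
      = fun out p => out.insert p.1 (pvValueA bars p) := by
    funext out p
    simp only [pvValueA]
    by_cases hc : (((p.2.items.filter (fun q =>
        q.2 == (PySem.List.max? p.2.values (fun c => c)).getD 0)).map (fun q => q.1)).length == 1) = true
    · simp only [hc, if_true]
    · simp only [hc, Bool.false_eq_true, if_false]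
      cases hf : bars.find? (pvPredA ((p.2.items.filter (fun q =>
          q.2 == (PySem.List.max? p.2.values (fun c => c)).getD 0)).map (fun q => q.1)) p.1) <;>
        simp
  rw [hfun]
  have hnodup : ((pvBuildByDim bars).items.map (fun p => p.1)).Nodup := by
    simpa [PySem.Dict.keys] using pvBuildByDim_keys_nodup bars
  rw [PySem.Dict.items_foldl_insert_fresh (pvBuildByDim bars).items (fun p => p.1)
    (fun p => pvValueA bars p) PySem.Dict.empty
    (fun a _ => PySem.Dict.contains_empty a.1) hnodup]
  simp only [PySem.Dict.empty, List.nil_append]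
  exact List.map_congr_left (fun p hp => by rw [pvValueA_eq bars p hp])
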